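-- pv_equiv track=rewrite | github.com/Danail57/Softuniada_Arena_Olimpiici | Group E/Average_Evens.py | average_even_numbers
-- ===== SOURCE A (Python) =====
-- def average_even_numbers(m, n):
--     total = 0
--     count = 0
--     for number in range(m, n + 1):
--         if number % 2 == 0:
--             total += number
--             count += 1
--     if count == 0:
--         return 0
--     return int (total / count)
-- ===== SOURCE B (Python) =====
-- def average_even_numbers(m, n):
--     # Closed form: the evens in [m, n] are an arithmetic progression, whose
--     # average is (first_even + last_even) / 2 (an exact integer, both ends even).
--     first = m + m % 2
--     last = n - n % 2
--     if first > last: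
--         return 0
--     return (first + last) // 2
-- ===== Notes on version B (the rewrite author's own statement) =====
-- stated objective: faster
-- what changed: Replaces the O(n-m) loop summing and counting evens with the O(1) closed form: first/last even of [m,n] via parity arithmetic, average = (first+last)//2.
import Mathlib
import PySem

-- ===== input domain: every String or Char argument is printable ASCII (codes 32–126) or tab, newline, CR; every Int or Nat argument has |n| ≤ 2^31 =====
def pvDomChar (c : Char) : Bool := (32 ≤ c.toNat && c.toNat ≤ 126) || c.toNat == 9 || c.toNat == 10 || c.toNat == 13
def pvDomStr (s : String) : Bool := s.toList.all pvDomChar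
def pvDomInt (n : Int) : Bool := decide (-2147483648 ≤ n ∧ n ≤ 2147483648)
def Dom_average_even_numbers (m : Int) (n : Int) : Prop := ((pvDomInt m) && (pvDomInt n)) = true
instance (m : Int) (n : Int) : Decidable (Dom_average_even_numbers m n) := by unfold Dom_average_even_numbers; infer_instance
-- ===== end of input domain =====

-- B replaces A's O(n-m) scan by the O(1) closed form (first_even + last_even) // 2.

-- ===== PORT A =====
-- Loop over range(m, n+1) accumulating (total, count) of the even numbers.
-- `int(total / count)`: Python's int/int true division is correctly rounded and here the
-- exact quotient total/count is itself an integer (arithmetic-progression average), so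
-- int() truncation yields exactly that integer; truncating division `tdiv` is exact here.
def average_even_numbers (m : Int) (n : Int) : Int :=
  let r := (PySem.List.pyRange m (n + 1) 1).foldl
    (fun (s : Int × Int) number =>
      if PySem.Int.mod number 2 = 0 then (s.1 + number, s.2 + 1) else s) (0, 0)
  if r.2 = 0 then 0 else r.1.tdiv r.2

-- ===== PORT B =====
def average_even_numbers_alt (m : Int) (n : Int) : Int :=
  let first := m + PySem.Int.mod m 2
  let last := n - PySem.Int.mod n 2
  if first > last then 0 else PySem.Int.floordiv (first + last) 2

-- ===== PRECONDITION & SPEC =====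
def Spec_average_even_numbers (m : Int) (n : Int) (out : Int) : Prop := out = average_even_numbers_alt m n
instance (m : Int) (n : Int) (out : Int) : Decidable (Spec_average_even_numbers m n out) := by unfold Spec_average_even_numbers; infer_instance

-- ===== CLAIM (what is proved, stated in full; the proofs are below) =====
def Claim_equal_average_even_numbers : Prop := ∀ (m : Int) (n : Int), Dom_average_even_numbers m n → Spec_average_even_numbers m n (average_even_numbers m n)

-- ===== LEMMAS AND PROOFS =====

-- purely arithmetic descriptions of the loop's result
def pvFe (m : Int) : Int := m + m % 2          -- first even ≥ m
def pvLe (n : Int) : Int := n - n % 2          -- last even ≤ n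
def pvCnt (m n : Int) : Int := if pvFe m ≤ pvLe n then (pvLe n - pvFe m) / 2 + 1 else 0
def pvAvg (m n : Int) : Int := (pvFe m + pvLe n) / 2

theorem pv_fold_closed (m : Int) : ∀ n : Int, m - 1 ≤ n →
    (PySem.List.pyRange m (n + 1) 1).foldl
      (fun (s : Int × Int) number =>
        if number % 2 = 0 then (s.1 + number, s.2 + 1) else s) (0, 0)
      = (pvCnt m n * pvAvg m n, pvCnt m n) := by
  intro n hn
  induction n, hn using Int.le_induction with
  | base =>
      rw [show m - 1 + 1 = m by ring, PySem.List.pyRange_one_eq_nil (le_refl m)]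
      have hc : pvCnt m (m - 1) = 0 := by unfold pvCnt pvFe pvLe; split <;> omega
      simp [List.foldl, hc]
  | succ n hmn ih =>
      have ih' := ih
      rw [show n + 1 + 1 = (n + 1) + 1 by ring,
          PySem.List.pyRange_one_succ_right (a := m) (b := n + 1) (by omega),
          List.foldl_append, ih']
      simp only [List.foldl]
      by_cases h2 : (n + 1) % 2 = 0
      · -- n+1 is even: it is appended to both sum and count
        have hfe2 : pvFe m % 2 = 0 := by unfold pvFe; omega
        have hfe_le : pvFe m ≤ n + 1 := by unfold pvFe; omega
        have hlen : pvLe n = n - 1 := by unfold pvLe; omega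
        have hlen1 : pvLe (n + 1) = n + 1 := by unfold pvLe; omega
        simp only [h2, if_true]
        by_cases hne : pvFe m ≤ n - 1
        · -- the interval [m, n] already contained an even number
          have hcnt : pvCnt m n = (n - 1 - pvFe m) / 2 + 1 := by
            unfold pvCnt; rw [hlen]; simp [hne]
          have hcnt1 : pvCnt m (n + 1) = pvCnt m n + 1 := by
            unfold pvCnt; rw [hlen, hlen1]; simp [hne, hfe_le]; omega
          have havg1 : pvAvg m (n + 1) = pvAvg m n + 1 := by
            unfold pvAvg; rw [hlen, hlen1]; omega
          have hkey : pvCnt m n + pvAvg m n = n := by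
            unfold pvAvg; rw [hcnt, hlen]; omega
          rw [hcnt1, havg1, Prod.mk.injEq]
          refine ⟨?_, rfl⟩
          have hexp : (pvCnt m n + 1) * (pvAvg m n + 1)
              = pvCnt m n * pvAvg m n + (pvCnt m n + pvAvg m n) + 1 := by ring
          rw [hexp, hkey]; ring
        · -- first even number of the whole interval is n+1 itself
          have hfe : pvFe m = n + 1 := by omega
          have hc0 : pvCnt m n = 0 := by unfold pvCnt; rw [hlen]; simp; omega
          have hc1 : pvCnt m (n + 1) = 1 := by
            unfold pvCnt; rw [hlen1, hfe]; simp
          have ha1 : pvAvg m (n + 1) = n + 1 := by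
            unfold pvAvg; rw [hlen1, hfe]; omega
          rw [hc0, hc1, ha1]; norm_num
      · -- n+1 is odd: nothing changes
        have hlen : pvLe (n + 1) = pvLe n := by unfold pvLe; omega
        simp only [h2, if_false]
        unfold pvCnt pvAvg
        rw [hlen]

-- ===== VERDICT (by name: the statement is the Claim_ definition above) =====
theorem average_even_numbers_spec : Claim_equal_average_even_numbers := by
  intro m n _
  unfold Spec_average_even_numbers average_even_numbers average_even_numbers_alt
  simp only [PySem.Int.mod_eq_emod_of_pos (b := 2) (by norm_num : (0:Int) < 2),
      PySem.Int.floordiv_eq_ediv_of_pos (b := 2) (by norm_num : (0:Int) < 2)]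
  by_cases hmn : m - 1 ≤ n
  · rw [pv_fold_closed m n hmn]
    dsimp only
    by_cases hne : pvFe m ≤ pvLe n
    · have hcnt : pvCnt m n = (pvLe n - pvFe m) / 2 + 1 := by unfold pvCnt; simp [hne]
      have hfe2 : pvFe m % 2 = 0 := by unfold pvFe; omega
      have hle2 : pvLe n % 2 = 0 := by unfold pvLe; omega
      have hpos : pvCnt m n ≠ 0 := by rw [hcnt]; omega
      rw [if_neg hpos, if_neg (by unfold pvFe pvLe at hne; omega),
          Int.mul_tdiv_cancel_left _ hpos]
      unfold pvAvg pvFe pvLe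
      rfl
    · have hc0 : pvCnt m n = 0 := by unfold pvCnt; simp [hne]
      rw [hc0, if_pos rfl, if_pos (by unfold pvFe pvLe at hne; omega)]
  · rw [PySem.List.pyRange_one_eq_nil (by omega : (n : Int) + 1 ≤ m)]
    dsimp only [List.foldl]
    rw [if_pos rfl, if_pos (by omega)]
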